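-- pv_equiv track=rewrite | github.com/pypi-data/pypi-mirror-17 | packages/sve_common_tools/sve_common_tools-0.1.5.tar.gz/sve_common_tools-0.1.5/sve_common_tools/Sve_file_utils.py | parse_extact_table
-- ===== SOURCE A (Python) =====
-- def parse_extact_table(str, header_column_position):
--     result = []
--     for out_result_row in str.splitlines():
--         arr = []
--         for i in range(0, len(header_column_position)):
--             start_pos = header_column_position[i][0]
--             if header_column_position[i][1] is None:
--                 if i < len(header_column_position) - 1:
--                     end_pos = header_column_position[i + 1][0] - 1
--                 else:
--                     end_pos = len(out_result_row)
--             else: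
--                 end_pos = header_column_position[i][1] - 1
--             d = out_result_row[start_pos:end_pos].strip()
--             arr.append(d)
--         result.append(arr)
--
--     if len(result) == 0:
--         raise Exception('TI_Utilis', 'No param list (' + str + ')')
--     return result
-- ===== SOURCE B (Python) =====
-- def _bounds(cols):
--     # recursive: per column (start, end) with end=None meaning "to end of line"
--     if not cols:
--         return []
--     (s, e), rest = cols[0], cols[1:]
--     if e is not None:
--         end = e - 1
--     elif rest:
--         end = rest[0][0] - 1
--     else:
--         end = None
--     return [(s, end)] + _bounds(rest)
--
--
-- def parse_extact_table(str, header_column_position):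
--     bounds = _bounds(header_column_position)
--     result = [[line[s:e].strip() for (s, e) in bounds]
--               for line in str.splitlines()]
--     if not result:
--         raise Exception('TI_Utilis', 'No param list (' + str + ')')
--     return result
-- ===== Notes on version B (the rewrite author's own statement) =====
-- stated objective: alternative
-- what changed: B replaces A's per-line indexed inner loop (recomputing each column's start/end with lookahead on every line) by a boundaries table built once by structural recursion over the column list, then one map of plain slices over the lines; the last open column becomes an open-ended slice instead of an end index of len(line).
import Mathlib
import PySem

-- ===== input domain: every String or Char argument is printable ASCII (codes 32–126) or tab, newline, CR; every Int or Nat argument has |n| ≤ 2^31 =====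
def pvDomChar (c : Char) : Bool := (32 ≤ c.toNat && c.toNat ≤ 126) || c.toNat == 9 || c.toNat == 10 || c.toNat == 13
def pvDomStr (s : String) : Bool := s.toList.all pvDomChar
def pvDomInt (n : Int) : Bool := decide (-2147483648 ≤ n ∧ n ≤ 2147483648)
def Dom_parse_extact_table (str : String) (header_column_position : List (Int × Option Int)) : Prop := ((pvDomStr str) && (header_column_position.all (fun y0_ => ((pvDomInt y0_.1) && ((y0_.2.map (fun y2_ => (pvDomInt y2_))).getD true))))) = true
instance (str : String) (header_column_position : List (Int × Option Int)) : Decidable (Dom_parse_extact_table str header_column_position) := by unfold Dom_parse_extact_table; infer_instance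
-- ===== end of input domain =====

-- B hoists the per-column boundary computation out of the line loop into one
-- recursively built (start, end?) table, then maps plain slices over the lines
-- (objective: simpler/alternative decomposition; same asymptotic cost).

-- ===== PORT A =====
def parse_extact_table (str : String) (header_column_position : List (Int × Option Int)) : List (List String) :=
  (PySem.Str.splitlines str).foldl (fun result out_result_row =>
    let arr := (PySem.List.pyRange 0 (header_column_position.length : Int) 1).foldl
      (fun arr i =>
        let start_pos := (PySem.List.pyGetD header_column_position i ((0 : Int), (none : Option Int))).1
        let end_pos : Int :=
          match (PySem.List.pyGetD header_column_position i ((0 : Int), (none : Option Int))).2 with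
          | none =>
            if i < (header_column_position.length : Int) - 1 then
              (PySem.List.pyGetD header_column_position (i + 1) ((0 : Int), (none : Option Int))).1 - 1
            else
              (out_result_row.length : Int)
          | some v => v - 1
        arr ++ [PySem.Str.strip (PySem.Str.slice out_result_row (some start_pos) (some end_pos))])
      []
    result ++ [arr]) []

-- ===== PORT B =====
-- recursive boundaries table: (start, some end) or (start, none) = slice to end of line
def pvBoundsB : List (Int × Option Int) → List (Int × Option Int)
  | [] => []
  | (s, e) :: rest =>
      (s, match e with
          | some v => some (v - 1)
          | none =>
            match rest with
            | (s2, _) :: _ => some (s2 - 1)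
            | [] => none) :: pvBoundsB rest

def parse_extact_table_alt (str : String) (header_column_position : List (Int × Option Int)) : List (List String) :=
  let bounds := pvBoundsB header_column_position
  (PySem.Str.splitlines str).map (fun line =>
    bounds.map (fun se => PySem.Str.strip (PySem.Str.slice line (some se.1) se.2)))

-- ===== PRECONDITION & SPEC =====
-- Pre_ excludes only the empty string, the one input where str.splitlines() is empty and A raises Exception('TI_Utilis', …).
def Pre_parse_extact_table (str : String) (header_column_position : List (Int × Option Int)) : Prop := str ≠ ""
instance (str : String) (header_column_position : List (Int × Option Int)) : Decidable (Pre_parse_extact_table str header_column_position) := by unfold Pre_parse_extact_table; infer_instance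
def pvWitness_parse_extact_table : String × (List (Int × Option Int)) := ("ab cd\nef gh", [(0, none), (3, some 6)])

def Spec_parse_extact_table (str : String) (header_column_position : List (Int × Option Int)) (out : List (List String)) : Prop := out = parse_extact_table_alt str header_column_position
instance (str : String) (header_column_position : List (Int × Option Int)) (out : List (List String)) : Decidable (Spec_parse_extact_table str header_column_position out) := by unfold Spec_parse_extact_table; infer_instance

-- ===== CLAIM (what is proved, stated in full; the proofs are below) =====
def Claim_equal_parse_extact_table : Prop := ∀ (str : String) (header_column_position : List (Int × Option Int)), Dom_parse_extact_table str header_column_position → Pre_parse_extact_table str header_column_position → Spec_parse_extact_table str header_column_position (parse_extact_table str header_column_position)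

-- ===== LEMMAS AND PROOFS =====
set_option maxHeartbeats 1000000

-- append-accumulator foldl over range(0,n) is a map over List.range n
theorem pv_foldl_pyRange_map (g : Int → String) (n : Nat) (acc : List String) :
    (PySem.List.pyRange 0 (n : Int) 1).foldl (fun arr i => arr ++ [g i]) acc
      = acc ++ (List.range n).map (fun (j : Nat) => g ((j : Nat) : Int)) := by
  induction n generalizing acc with
  | zero => simp
  | succ m ih =>
      rw [show ((m + 1 : Nat) : Int) = (m : Int) + 1 by push_cast; ring,
          PySem.List.pyRange_one_succ_right (a := 0) (b := (m : Int)) (by exact_mod_cast Nat.zero_le m),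
          List.foldl_append, ih, List.range_succ]
      simp

-- accumulator foldl building rows is a map
theorem pv_foldl_map (f : String → List String) (l : List String) (acc : List (List String)) :
    l.foldl (fun r row => r ++ [f row]) acc = acc ++ l.map f := by
  induction l generalizing acc with
  | nil => simp
  | cons x xs ih => simp [ih]

-- slicing a string up to its own length is slicing to the end of the string
theorem pv_slice_len (row : String) (a : Int) :
    PySem.Str.slice row (some a) (some (row.length : Int))
      = PySem.Str.slice row (some a) none := by
  simp [PySem.Str.slice]
  rw [← String.length_toList]
  simp [PySem.List.slice]

-- A's inner-loop body as a function of the column index (definitionally A's body)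
def pvCell (hcp : List (Int × Option Int)) (row : String) (i : Int) : String :=
  PySem.Str.strip (PySem.Str.slice row
    (some (PySem.List.pyGetD hcp i ((0 : Int), (none : Option Int))).1)
    (some (match (PySem.List.pyGetD hcp i ((0 : Int), (none : Option Int))).2 with
      | none =>
        if i < (hcp.length : Int) - 1 then
          (PySem.List.pyGetD hcp (i + 1) ((0 : Int), (none : Option Int))).1 - 1
        else (row.length : Int)
      | some v => v - 1)))

-- shifting the index into the tail of the column list
theorem pvCell_succ (s : Int) (e : Option Int) (rest : List (Int × Option Int)) (row : String) (j : Nat) :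
    pvCell ((s, e) :: rest) row ((j + 1 : Nat) : Int) = pvCell rest row (j : Int) := by
  unfold pvCell
  have h2 : ((j + 1 : Nat) : Int) + 1 = ((j + 2 : Nat) : Int) := by push_cast; ring
  rw [h2]
  simp only [PySem.List.pyGetD_natCast, List.getD_cons_succ, List.length_cons]
  have hiff : (((j + 1 : Nat) : Int) < ((rest.length + 1 : Nat) : Int) - 1) = ((j : Int) < (rest.length : Int) - 1) := by
    simp only [eq_iff_iff]; push_cast; omega
  have h3 : ((j : Nat) : Int) + 1 = ((j + 1 : Nat) : Int) := by push_cast; ring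
  simp only [hiff, h3, PySem.List.pyGetD_natCast]

-- per row: A's indexed inner loop equals mapping over B's boundaries table
theorem pv_row (hcp : List (Int × Option Int)) (row : String) :
    (List.range hcp.length).map (fun (j : Nat) => pvCell hcp row ((j : Nat) : Int))
      = (pvBoundsB hcp).map (fun se => PySem.Str.strip (PySem.Str.slice row (some se.1) se.2)) := by
  induction hcp with
  | nil => simp [pvBoundsB]
  | cons c rest ih =>
      obtain ⟨s, e⟩ := c
      rw [List.length_cons, List.range_succ_eq_map, List.map_cons, List.map_map]
      have htail : List.map ((fun (j : Nat) => pvCell ((s,e)::rest) row ((j : Nat) : Int)) ∘ Nat.succ) (List.range rest.length)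
          = (pvBoundsB rest).map (fun se => PySem.Str.strip (PySem.Str.slice row (some se.1) se.2)) := by
        rw [← ih]
        apply List.map_congr_left
        intro j _
        show pvCell ((s,e)::rest) row ((j.succ : Nat) : Int) = pvCell rest row (j : Int)
        exact pvCell_succ s e rest row j
      simp only [pvBoundsB, List.map_cons]
      refine congrArg₂ _ ?_ htail
      unfold pvCell
      simp only [Nat.cast_zero, PySem.List.pyGetD_zero_cons, List.length_cons]
      cases e with
      | some v => rfl
      | none =>
        cases rest with
        | nil =>
            norm_num
            exact congrArg _ (pv_slice_len row s)
        | cons c2 r2 =>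
            obtain ⟨s2, e2⟩ := c2
            show PySem.Str.strip (PySem.Str.slice row (some s)
                (some (if (0:Int) < ((((s2,e2)::r2).length + 1 : Nat) : Int) - 1 then
                  (PySem.List.pyGetD ((s, none) :: (s2, e2) :: r2) (0 + 1) ((0:Int), (none:Option Int))).1 - 1
                 else (row.length : Int))))
              = PySem.Str.strip (PySem.Str.slice row (some s) (some (s2 - 1)))
            have hc : ((0:Int) < ((((s2,e2)::r2).length + 1 : Nat) : Int) - 1) := by
              simp only [List.length_cons]; push_cast; omega
            rw [if_pos hc]
            norm_num
            rw [show (1:Int) = ((1:Nat):Int) from rfl, PySem.List.pyGetD_natCast]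
            simp

-- ===== VERDICT (by name: the statement is the Claim_ definition above) =====
theorem parse_extact_table_spec : Claim_equal_parse_extact_table := by
  intro s hcp _ _
  unfold Spec_parse_extact_table parse_extact_table parse_extact_table_alt
  rw [pv_foldl_map]
  simp only [List.nil_append]
  congr 1
  funext row
  rw [pv_foldl_pyRange_map, List.nil_append]
  exact pv_row hcp row
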